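-- pv_equiv track=rewrite | github.com/W-M-plasma-group/Driftwave_Persistence_Code | Midlife3D.py | get_betti
-- ===== SOURCE A (Python) =====
-- def get_betti(p):
--   b0=[];y1=[];b1=[];y2=[];b2=[];y3=[]
--   for i in range(len(p)):
--     if p[i][0]==0:
--       b0.append(p[i][1][0])
--       y1.append(p[i][1][1])
--     elif p[i][0]==1:
--       b1.append(p[i][1][0])
--       y2.append(p[i][1][1])
--     else:
--       b2.append(p[i][1][0])
--       y3.append(p[i][1][1])
--   return(b0,y1,b1,y2,b2,y3)
-- ===== SOURCE B (Python) =====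
-- def _transpose(pairs):
--     if not pairs:
--         return [], []
--     xs, ys = zip(*pairs)
--     return list(xs), list(ys)
--
-- def get_betti(p):
--     buckets = {0: [], 1: [], 2: []}
--     for dim, pair in p:
--         buckets[dim if dim in (0, 1) else 2].append(pair)
--     b0, y1 = _transpose(buckets[0])
--     b1, y2 = _transpose(buckets[1])
--     b2, y3 = _transpose(buckets[2])
--     return (b0, y1, b1, y2, b2, y3)
-- ===== Notes on version B (the rewrite author's own statement) =====
-- stated objective: alternative
-- what changed: B groups whole (birth,death) pairs into a dict of three buckets keyed by clamped dimension, then splits each bucket into two lists with a zip transpose, instead of A's single branching loop over indices maintaining six scalar accumulators.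
import Mathlib
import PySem

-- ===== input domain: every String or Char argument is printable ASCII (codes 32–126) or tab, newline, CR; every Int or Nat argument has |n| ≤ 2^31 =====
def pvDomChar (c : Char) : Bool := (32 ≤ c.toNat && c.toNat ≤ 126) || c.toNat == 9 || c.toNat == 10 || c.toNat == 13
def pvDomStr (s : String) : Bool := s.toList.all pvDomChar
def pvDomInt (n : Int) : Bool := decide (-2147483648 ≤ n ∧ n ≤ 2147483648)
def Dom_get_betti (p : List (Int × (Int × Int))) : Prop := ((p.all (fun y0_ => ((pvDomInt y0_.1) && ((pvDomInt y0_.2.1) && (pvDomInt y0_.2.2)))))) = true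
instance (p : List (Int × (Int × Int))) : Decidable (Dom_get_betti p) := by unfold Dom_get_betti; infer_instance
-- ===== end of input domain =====

-- B replaces A's single branching loop with six accumulators by a dict of three
-- pair-buckets (classify stage) followed by a zip-transpose of each bucket (split
-- stage); objective: alternative decomposition, same O(n) cost.


-- ===== PORT A =====
-- A: one pass over indices, appending to six accumulators
def getBettiLoop (p : List (Int × (Int × Int))) :
    List Int × List Int × List Int × List Int × List Int × List Int →
    List Int × List Int × List Int × List Int × List Int × List Int
  | (b0, y1, b1, y2, b2, y3) =>
    match p with
    | [] => (b0, y1, b1, y2, b2, y3)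
    | x :: rest =>
      if x.1 = 0 then
        getBettiLoop rest (b0 ++ [x.2.1], y1 ++ [x.2.2], b1, y2, b2, y3)
      else if x.1 = 1 then
        getBettiLoop rest (b0, y1, b1 ++ [x.2.1], y2 ++ [x.2.2], b2, y3)
      else
        getBettiLoop rest (b0, y1, b1, y2, b2 ++ [x.2.1], y3 ++ [x.2.2])

def get_betti (p : List (Int × (Int × Int))) : List Int × List Int × List Int × List Int × List Int × List Int :=
  getBettiLoop p ([], [], [], [], [], [])

-- ===== PORT B =====
-- B helper: zip(*pairs) as a transpose (Python's empty-tuple case made explicit)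
def transposePairs (pairs : List (Int × Int)) : List Int × List Int :=
  if pairs = [] then ([], [])
  else (pairs.map (fun q => q.1), pairs.map (fun q => q.2))

-- B: classify whole pairs into a dict of three buckets, then transpose each bucket
def get_betti_alt (p : List (Int × (Int × Int))) : List Int × List Int × List Int × List Int × List Int × List Int :=
  let init : PySem.Dict Int (List (Int × Int)) :=
    ((PySem.Dict.empty.insert 0 []).insert 1 []).insert 2 []
  let buckets := p.foldl
    (fun d x => d.modify (if x.1 = 0 ∨ x.1 = 1 then x.1 else 2) [] (fun l => l ++ [x.2])) init
  let t0 := transposePairs (buckets.getD 0 [])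
  let t1 := transposePairs (buckets.getD 1 [])
  let t2 := transposePairs (buckets.getD 2 [])
  (t0.1, t0.2, t1.1, t1.2, t2.1, t2.2)

-- ===== PRECONDITION & SPEC =====
def Spec_get_betti (p : List (Int × (Int × Int))) (out : List Int × List Int × List Int × List Int × List Int × List Int) : Prop := out = get_betti_alt p
instance (p : List (Int × (Int × Int))) (out : List Int × List Int × List Int × List Int × List Int × List Int) : Decidable (Spec_get_betti p out) := by unfold Spec_get_betti; infer_instance

-- ===== CLAIM =====
def Claim_equal_get_betti : Prop := ∀ (p : List (Int × (Int × Int))), Dom_get_betti p → Spec_get_betti p (get_betti p)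

-- ===== LEMMAS AND PROOFS =====

-- A's loop, characterised by accumulators + filters
lemma getBettiLoop_acc (p : List (Int × (Int × Int)))
    (b0 y1 b1 y2 b2 y3 : List Int) :
    getBettiLoop p (b0, y1, b1, y2, b2, y3) =
      (b0 ++ (p.filter (fun x => x.1 = 0)).map (fun x => x.2.1),
       y1 ++ (p.filter (fun x => x.1 = 0)).map (fun x => x.2.2),
       b1 ++ (p.filter (fun x => x.1 = 1)).map (fun x => x.2.1),
       y2 ++ (p.filter (fun x => x.1 = 1)).map (fun x => x.2.2),
       b2 ++ (p.filter (fun x => !(x.1 = 0 || x.1 = 1))).map (fun x => x.2.1),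
       y3 ++ (p.filter (fun x => !(x.1 = 0 || x.1 = 1))).map (fun x => x.2.2)) := by
  induction p generalizing b0 y1 b1 y2 b2 y3 with
  | nil => simp [getBettiLoop]
  | cons x rest ih =>
    by_cases h0 : x.1 = 0
    · simp [getBettiLoop, h0, ih]
    · by_cases h1 : x.1 = 1
      · simp [getBettiLoop, h1, ih]
      · simp [getBettiLoop, h0, h1, ih]

-- B's bucket-filling fold, characterised per key
lemma bucketFold_getD (p : List (Int × (Int × Int)))
    (d : PySem.Dict Int (List (Int × Int))) (k : Int) :
    (p.foldl (fun d x =>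
        d.modify (if x.1 = 0 ∨ x.1 = 1 then x.1 else 2) [] (fun l => l ++ [x.2])) d).getD k []
      = d.getD k [] ++
        (p.filter (fun x => (if x.1 = 0 ∨ x.1 = 1 then x.1 else 2) = k)).map (fun x => x.2) := by
  induction p generalizing d with
  | nil => simp
  | cons x rest ih =>
    simp only [List.foldl_cons, ih, List.filter_cons, PySem.Dict.getD_modify]
    by_cases hk : k = (if x.1 = 0 ∨ x.1 = 1 then x.1 else 2)
    · simp [hk, eq_comm]
    · have hk' : ¬ (if x.1 = 0 ∨ x.1 = 1 then x.1 else 2) = k := fun h => hk h.symm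
      simp [hk, hk']

lemma transposePairs_eq (pairs : List (Int × Int)) :
    transposePairs pairs = (pairs.map (fun q => q.1), pairs.map (fun q => q.2)) := by
  cases pairs <;> simp [transposePairs]

-- ===== VERDICT =====
theorem get_betti_spec : Claim_equal_get_betti := by
  intro p _
  unfold Spec_get_betti get_betti get_betti_alt
  have e0 : (fun x : Int × (Int × Int) => decide ((if x.1 = 0 ∨ x.1 = 1 then x.1 else 2) = 0))
      = (fun x : Int × (Int × Int) => decide (x.1 = 0)) := by
    funext x; by_cases h0 : x.1 = 0 <;> by_cases h1 : x.1 = 1 <;> simp [h0, h1]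
  have e1 : (fun x : Int × (Int × Int) => decide ((if x.1 = 0 ∨ x.1 = 1 then x.1 else 2) = 1))
      = (fun x : Int × (Int × Int) => decide (x.1 = 1)) := by
    funext x; by_cases h0 : x.1 = 0 <;> by_cases h1 : x.1 = 1 <;> simp [h0, h1]
  have e2 : (fun x : Int × (Int × Int) => decide ((if x.1 = 0 ∨ x.1 = 1 then x.1 else 2) = 2))
      = (fun x : Int × (Int × Int) => !(decide (x.1 = 0) || decide (x.1 = 1))) := by
    funext x; by_cases h0 : x.1 = 0 <;> by_cases h1 : x.1 = 1 <;> simp [h0, h1]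
  simp only [getBettiLoop_acc, bucketFold_getD, transposePairs_eq, e0, e1, e2,
    PySem.Dict.getD_insert, List.nil_append]
  simp [Function.comp]
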